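-- pv_equiv track=rewrite | github.com/CaliEye/My-Investor-Dashboard | scripts/overnight_research_pull.py | build_actions
-- ===== SOURCE A (Python) =====
-- from typing import Any
--
-- def build_actions(scored: list[dict[str, Any]]) -> list[str]:
--     top = scored[:10]
--     actions: list[str] = []
--
--     github_top = [x for x in top if x["item"].get("source") == "github"][:3]
--     for entry in github_top:
--         repo = entry["item"].get("name", "repo")
--         actions.append(f"Sandbox test {repo} and evaluate integration fit within 24h.")
--
--     data_top = [x for x in top if x["item"].get("source") == "huggingface"][:2]
--     for entry in data_top:
--         ds = entry["item"].get("name", "dataset")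
--         actions.append(f"Run data quality + leakage audit on {ds} before adding to feature store.")
--
--     paper_top = [x for x in top if x["item"].get("source") == "arxiv"][:2]
--     for entry in paper_top:
--         title = entry["item"].get("title", "paper")
--         actions.append(f"Extract implementable hypothesis from paper: {title[:90]}.")
--
--     if not actions:
--         actions.append("No high-confidence external signals detected; keep current system and re-scan next cycle.")
--
--     actions.append("Maintain strict risk controls; external research informs process, not guaranteed returns.")
--     return actions[:8]
-- ===== SOURCE B (Python) =====
-- def build_actions(scored: list) -> list:
--     # One indexing pass: bucket each top item by its source, then a table-driven emit pass.
--     buckets = {}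
--     for x in scored[:10]:
--         item = x["item"]
--         buckets.setdefault(item.get("source"), []).append(item)
--
--     spec = (
--         ("github", 3, "name", "repo",
--          "Sandbox test ", " and evaluate integration fit within 24h.", None),
--         ("huggingface", 2, "name", "dataset",
--          "Run data quality + leakage audit on ", " before adding to feature store.", None),
--         ("arxiv", 2, "title", "paper",
--          "Extract implementable hypothesis from paper: ", ".", 90),
--     )
--     actions = []
--     for src, limit, key, default, pre, suf, cut in spec:
--         for item in buckets.get(src, [])[:limit]:
--             val = item.get(key, default)
--             actions.append(pre + (val if cut is None else val[:cut]) + suf)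
--
--     if not actions:
--         actions.append("No high-confidence external signals detected; keep current system and re-scan next cycle.")
--     actions.append("Maintain strict risk controls; external research informs process, not guaranteed returns.")
--     return actions[:8]
-- ===== Notes on version B (the rewrite author's own statement) =====
-- stated objective: alternative
-- what changed: Replaces A's three separate filter-then-format scans over the top-10 list with one grouping pass into source-keyed buckets followed by a single table-driven emit loop over (source, limit, key, default, template) rows.
import Mathlib
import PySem

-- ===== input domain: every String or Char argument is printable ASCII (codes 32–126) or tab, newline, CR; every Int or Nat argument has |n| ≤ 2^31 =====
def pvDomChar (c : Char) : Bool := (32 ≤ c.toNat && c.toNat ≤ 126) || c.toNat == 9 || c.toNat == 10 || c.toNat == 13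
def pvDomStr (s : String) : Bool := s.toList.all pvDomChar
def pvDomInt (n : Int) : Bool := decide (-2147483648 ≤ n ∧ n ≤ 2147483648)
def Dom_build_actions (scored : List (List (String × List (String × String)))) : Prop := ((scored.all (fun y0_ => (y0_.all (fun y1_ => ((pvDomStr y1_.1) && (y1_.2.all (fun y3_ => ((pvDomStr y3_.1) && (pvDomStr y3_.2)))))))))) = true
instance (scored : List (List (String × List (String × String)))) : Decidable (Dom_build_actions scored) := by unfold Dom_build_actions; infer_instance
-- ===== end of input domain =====

-- B groups the top-10 entries by source in ONE pass into a dict of buckets, then emits the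
-- action strings from a (source, limit, key, default, template) table; same return value as A.

-- x["item"] (first-match dict lookup; Pre_ guarantees the key exists)
def pyItem (x : List (String × List (String × String))) : List (String × String) :=
  (PySem.Dict.mk x).getD "item" []

-- item.get("source")
def pySrc (x : List (String × List (String × String))) : Option String :=
  (PySem.Dict.mk (pyItem x)).get? "source"

-- ===== PORT A =====
def build_actions (scored : List (List (String × List (String × String)))) : List String :=
  let top := PySem.List.slice scored none (some 10)
  let actions : List String := []
  let github_top := PySem.List.slice (top.filter (fun x => pySrc x == some "github")) none (some 3)
  let actions := github_top.foldl (fun acc entry =>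
    acc ++ ["Sandbox test " ++ (PySem.Dict.mk (pyItem entry)).getD "name" "repo" ++ " and evaluate integration fit within 24h."]) actions
  let data_top := PySem.List.slice (top.filter (fun x => pySrc x == some "huggingface")) none (some 2)
  let actions := data_top.foldl (fun acc entry =>
    acc ++ ["Run data quality + leakage audit on " ++ (PySem.Dict.mk (pyItem entry)).getD "name" "dataset" ++ " before adding to feature store."]) actions
  let paper_top := PySem.List.slice (top.filter (fun x => pySrc x == some "arxiv")) none (some 2)
  let actions := paper_top.foldl (fun acc entry =>
    acc ++ ["Extract implementable hypothesis from paper: " ++ PySem.Str.slice ((PySem.Dict.mk (pyItem entry)).getD "title" "paper") none (some 90) ++ "."]) actions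
  let actions := if actions = [] then actions ++ ["No high-confidence external signals detected; keep current system and re-scan next cycle."] else actions
  let actions := actions ++ ["Maintain strict risk controls; external research informs process, not guaranteed returns."]
  PySem.List.slice actions none (some 8)

-- ===== PORT B =====
structure PvRow where
  src : String
  limit : Int
  key : String
  dflt : String
  pre : String
  suf : String
  cut : Option Int
deriving Repr, DecidableEq

def pvSpec : List PvRow :=
  [⟨"github", 3, "name", "repo", "Sandbox test ", " and evaluate integration fit within 24h.", none⟩,
   ⟨"huggingface", 2, "name", "dataset", "Run data quality + leakage audit on ", " before adding to feature store.", none⟩,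
   ⟨"arxiv", 2, "title", "paper", "Extract implementable hypothesis from paper: ", ".", some 90⟩]

def build_actions_alt (scored : List (List (String × List (String × String)))) : List String :=
  let buckets := (PySem.List.slice scored none (some 10)).foldl
    (fun (d : PySem.Dict (Option String) (List (List (String × String)))) x =>
      let item := pyItem x
      d.modify ((PySem.Dict.mk item).get? "source") [] (· ++ [item]))
    PySem.Dict.empty
  let actions := pvSpec.foldl (fun acc r =>
    (PySem.List.slice (buckets.getD (some r.src) []) none (some r.limit)).foldl
      (fun acc2 item =>
        let val := (PySem.Dict.mk item).getD r.key r.dflt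
        acc2 ++ [r.pre ++ (match r.cut with
                           | none => val
                           | some c => PySem.Str.slice val none (some c)) ++ r.suf]) acc) []
  let actions := if actions = [] then actions ++ ["No high-confidence external signals detected; keep current system and re-scan next cycle."] else actions
  let actions := actions ++ ["Maintain strict risk controls; external research informs process, not guaranteed returns."]
  PySem.List.slice actions none (some 8)

-- ===== PRECONDITION & SPEC =====
-- Pre_ excludes exactly the inputs where some of the first 10 entries lacks the "item" key:
-- there Python A (and B) raise KeyError.
def Pre_build_actions (scored : List (List (String × List (String × String)))) : Prop :=
  ∀ x ∈ PySem.List.slice scored none (some 10), (PySem.Dict.mk x).contains "item" = true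
instance (scored : List (List (String × List (String × String)))) : Decidable (Pre_build_actions scored) := by unfold Pre_build_actions; infer_instance

def pvWitness_build_actions : (List (List (String × List (String × String)))) :=
  [[("item", [("source", "github"), ("name", "r1")])],
   [("item", [("source", "arxiv"), ("title", "t1")])]]

def Spec_build_actions (scored : List (List (String × List (String × String)))) (out : List String) : Prop := out = build_actions_alt scored
instance (scored : List (List (String × List (String × String)))) (out : List String) : Decidable (Spec_build_actions scored out) := by unfold Spec_build_actions; infer_instance

-- ===== CLAIM (what is proved, stated in full; the proofs are below) =====
def Claim_equal_build_actions : Prop := ∀ (scored : List (List (String × List (String × String)))), Dom_build_actions scored → Pre_build_actions scored → Spec_build_actions scored (build_actions scored)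

-- ===== LEMMAS AND PROOFS =====

-- The bucket built by B's single grouping pass is exactly A's per-source filtered item list.
theorem bucket_eq (top : List (List (String × List (String × String)))) (s : String) :
    (top.foldl
      (fun (d : PySem.Dict (Option String) (List (List (String × String)))) x =>
        d.modify (pySrc x) [] (· ++ [pyItem x]))
      PySem.Dict.empty).getD (some s) []
    = (top.filter (fun x => pySrc x == some s)).map pyItem := by
  have h1 : (top.foldl
      (fun (d : PySem.Dict (Option String) (List (List (String × String)))) x =>
        d.modify (pySrc x) [] (· ++ [pyItem x]))
      PySem.Dict.empty)
      = ((top.map (fun x => (pySrc x, pyItem x))).foldl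
      (fun (d : PySem.Dict (Option String) (List (List (String × String)))) p =>
        d.modify p.1 [] (· ++ [p.2]))
      PySem.Dict.empty) := by
    rw [List.foldl_map]
  rw [h1, PySem.Dict.getD_foldl_modify_append]
  simp [List.filter_map, Function.comp_def]

-- ===== VERDICT (by name: the statement is the Claim_ definition above) =====
theorem build_actions_spec : Claim_equal_build_actions := by
  intro scored _ _
  unfold Spec_build_actions build_actions build_actions_alt pvSpec
  simp only []
  rw [show (fun (d : PySem.Dict (Option String) (List (List (String × String)))) x =>
        d.modify ((PySem.Dict.mk (pyItem x)).get? "source") [] (· ++ [pyItem x]))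
      = (fun (d : PySem.Dict (Option String) (List (List (String × String)))) x =>
        d.modify (pySrc x) [] (· ++ [pyItem x])) from rfl]
  simp only [List.foldl_cons, List.foldl_nil, bucket_eq]
  have h3 : ∀ {α : Type} (l : List α), PySem.List.slice l none (some 3) = l.take 3 :=
    fun l => PySem.List.slice_to_natCast l 3
  have h2 : ∀ {α : Type} (l : List α), PySem.List.slice l none (some 2) = l.take 2 :=
    fun l => PySem.List.slice_to_natCast l 2
  simp [h3, h2, ← List.map_take, Function.comp_def, pyItem]
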